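-- pv_equiv track=rewrite | github.com/PhilPark-geosr/study-codingtest | week7/nuri/불량 사용자.py | solution
-- ===== SOURCE A (Python) =====
-- from itertools import product
--
-- def isMatching(u_id, b_id):
--     if len(u_id) != len(b_id): return False
--     for u, b in zip(u_id, b_id):
--         if b == '*': continue
--         if u != b: return False
--     return True
--
-- def solution(user_id, banned_id):
--     result = set()
--     candidate = []
--     for b_id in banned_id:
--         candidate += [set([str(i) for i, v in enumerate(user_id) if isMatching(v, b_id)])]
--
--     for v in product(*candidate):
--         if len(set(v)) == len(banned_id):
--             result |= set([''.join(sorted(v))])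
--
--     return len(result)
-- ===== SOURCE B (Python) =====
-- def matches(u, b):
--     return len(u) == len(b) and all(bc == '*' or uc == bc for uc, bc in zip(u, b))
--
--
-- def solution(user_id, banned_id):
--     cands = [[str(i) for i, u in enumerate(user_id) if matches(u, b)]
--              for b in banned_id]
--     seen = set()
--     used = []
--
--     def dfs(k):
--         if k == len(cands):
--             seen.add(''.join(sorted(used)))
--             return
--         for s in cands[k]:
--             if s not in used:
--                 used.append(s)
--                 dfs(k + 1)
--                 used.pop()
--
--     dfs(0)
--     return len(seen)
-- ===== Notes on version B (the rewrite author's own statement) =====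
-- stated objective: faster
-- what changed: Replaces the full cartesian-product enumeration with a filter on distinct tuples by a backtracking DFS that assigns one unused candidate index per banned pattern, pruning repeated indices before descending.
import Mathlib
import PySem

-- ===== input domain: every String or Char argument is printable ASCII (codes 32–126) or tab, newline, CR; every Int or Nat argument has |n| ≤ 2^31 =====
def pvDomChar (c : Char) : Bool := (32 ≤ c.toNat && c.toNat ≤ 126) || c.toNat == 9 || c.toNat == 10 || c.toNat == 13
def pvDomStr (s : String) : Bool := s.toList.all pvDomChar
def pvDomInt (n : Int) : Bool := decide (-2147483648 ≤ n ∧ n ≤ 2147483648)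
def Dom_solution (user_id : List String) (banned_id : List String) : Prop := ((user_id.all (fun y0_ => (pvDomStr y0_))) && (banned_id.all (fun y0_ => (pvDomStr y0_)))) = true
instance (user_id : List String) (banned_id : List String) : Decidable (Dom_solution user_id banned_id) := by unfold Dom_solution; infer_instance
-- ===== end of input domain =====

-- B replaces A's full cartesian-product enumeration (which filters tuples with repeated
-- indices only after generating them) by a backtracking DFS that assigns one unused candidate
-- index per banned pattern, pruning repeated indices before descending (objective: faster).


-- ===== PORT A =====
def isMatching (u_id : String) (b_id : String) : Bool :=
  if PySem.Str.len u_id ≠ PySem.Str.len b_id then false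
  else (u_id.toList.zip b_id.toList).all (fun p => p.2 == '*' || p.1 == p.2)

-- itertools.product(*candidate) ported as the standard cartesian product in iteration order
def pyProduct : List (List String) → List (List String)
  | [] => [[]]
  | c :: rest => c.flatMap (fun x => (pyProduct rest).map (fun t => x :: t))

def solution (user_id : List String) (banned_id : List String) : Int :=
  let candidate : List (List String) :=
    banned_id.foldl (fun acc b_id =>
      acc ++ [PySem.Set.ofList ((PySem.List.enumerate user_id).filterMap
        (fun p => if isMatching p.2 b_id then some (PySem.Int.toStr p.1) else none))]) []
  let result : PySem.Set String :=
    (pyProduct candidate).foldl (fun res v =>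
      if PySem.Set.len (PySem.Set.ofList v) = (banned_id.length : Int) then
        PySem.Set.union res (PySem.Set.ofList [PySem.Str.join "" (PySem.List.sorted v (fun x => x) false)])
      else res) PySem.Set.empty
  PySem.Set.len result

-- ===== PORT B =====
def matchesB (u : String) (b : String) : Bool :=
  PySem.Str.len u == PySem.Str.len b &&
  (u.toList.zip b.toList).all (fun p => p.2 == '*' || p.1 == p.2)

mutual
-- dfs(k): at a leaf add the canonical key of `used`; else try each unused candidate of the next pattern
def dfsB : List (List String) → List String → PySem.Set String → PySem.Set String
  | [], used, seen => PySem.Set.add seen (PySem.Str.join "" (PySem.List.sorted used (fun x => x) false))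
  | c :: rest, used, seen => dfsLoop c rest used seen
  termination_by cands _ _ => (cands.length, 0)

-- the `for s in cands[k]` loop body of dfs
def dfsLoop : List String → List (List String) → List String → PySem.Set String → PySem.Set String
  | [], _, _, seen => seen
  | s :: cs, rest, used, seen =>
      dfsLoop cs rest used (if used.contains s then seen else dfsB rest (used ++ [s]) seen)
  termination_by c rest _ _ => (rest.length, c.length + 1)
end

def solution_alt (user_id : List String) (banned_id : List String) : Int :=
  let cands : List (List String) :=
    banned_id.map (fun b => (PySem.List.enumerate user_id).filterMap
      (fun p => if matchesB p.2 b then some (PySem.Int.toStr p.1) else none))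
  PySem.Set.len (dfsB cands [] PySem.Set.empty)

-- ===== PRECONDITION & SPEC =====
def Spec_solution (user_id : List String) (banned_id : List String) (out : Int) : Prop := out = solution_alt user_id banned_id
instance (user_id : List String) (banned_id : List String) (out : Int) : Decidable (Spec_solution user_id banned_id out) := by unfold Spec_solution; infer_instance

-- ===== CLAIM (what is proved, stated in full; the proofs are below) =====
def Claim_equal_solution : Prop := ∀ (user_id : List String) (banned_id : List String), Dom_solution user_id banned_id → Spec_solution user_id banned_id (solution user_id banned_id)

-- ===== LEMMAS AND PROOFS =====

-- str is injective on natural numbers (decimal digit lists of distinct naturals differ)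
lemma digitChar_inj {a b : Nat} (ha : a < 10) (hb : b < 10)
    (h : Nat.digitChar a = Nat.digitChar b) : a = b := by
  interval_cases a <;> interval_cases b <;> simp_all [Nat.digitChar]

lemma toDigits_ten_inj : ∀ {m n : Nat}, Nat.toDigits 10 m = Nat.toDigits 10 n → m = n := by
  intro m
  induction m using Nat.strong_induction_on with
  | _ m ih =>
    intro n h
    rw [Nat.toDigits_eq_if (n := m) (by norm_num), Nat.toDigits_eq_if (n := n) (by norm_num)] at h
    by_cases h1 : m < 10 <;> by_cases h2 : n < 10
    · rw [if_pos h1, if_pos h2] at h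
      exact digitChar_inj h1 h2 (by simpa using h)
    · rw [if_pos h1, if_neg h2] at h
      have hl := congrArg List.length h
      have := Nat.length_toDigits_pos (b := 10) (n := n / 10)
      simp only [List.length_cons, List.length_append, List.length_nil] at hl; omega
    · rw [if_neg h1, if_pos h2] at h
      have hl := congrArg List.length h
      have := Nat.length_toDigits_pos (b := 10) (n := m / 10)
      simp only [List.length_cons, List.length_append, List.length_nil] at hl; omega
    · rw [if_neg h1, if_neg h2] at h
      have hparts := List.append_inj' h (by simp)
      have hdiv : m / 10 = n / 10 :=
        ih (m / 10) (Nat.div_lt_self (by omega) (by norm_num)) hparts.1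
      have hmod : m % 10 = n % 10 :=
        digitChar_inj (Nat.mod_lt _ (by norm_num)) (Nat.mod_lt _ (by norm_num))
          (by simpa using hparts.2)
      omega

lemma toStr_inj_nonneg {m n : Int} (hm : 0 ≤ m) (hn : 0 ≤ n)
    (h : PySem.Int.toStr m = PySem.Int.toStr n) : m = n := by
  unfold PySem.Int.toStr PySem.Int.toChars at h
  rw [if_neg (by omega), if_neg (by omega)] at h
  have h2 : Nat.toDigits 10 m.toNat = Nat.toDigits 10 n.toNat := by
    have := congrArg String.toList h
    simpa using this
  have := toDigits_ten_inj h2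
  omega

-- conditional filterMap is map-after-filter
lemma filterMap_if_eq_map_filter {α β : Type} (l : List α) (f : α → Bool) (g : α → β) :
    l.filterMap (fun p => if f p then some (g p) else none) = (l.filter f).map g := by
  induction l with
  | nil => rfl
  | cons x xs ih => by_cases hx : f x <;> simp [hx, ih]

-- the candidate list of a pattern has no duplicates
lemma cand_nodup (user_id : List String) (f : Int × String → Bool) :
    ((PySem.List.enumerate user_id).filterMap
      (fun p => if f p then some (PySem.Int.toStr p.1) else none)).Nodup := by
  rw [filterMap_if_eq_map_filter]
  have hp : ((PySem.List.enumerate user_id).filter f).Pairwise (fun p q => p.1 < q.1) :=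
    (PySem.List.pairwise_lt_enumerate user_id 0).filter f
  have h1 : ((((PySem.List.enumerate user_id).filter f).map Prod.fst)).Pairwise (· < ·) :=
    hp.map Prod.fst (fun _ _ h => h)
  rw [show (fun p : Int × String => PySem.Int.toStr p.1) = (PySem.Int.toStr ∘ Prod.fst) from rfl,
    ← List.map_map]
  refine List.Nodup.map_on ?_ (h1.imp (fun h => ne_of_lt h))
  intro x hx y hy hxy
  have hnn : ∀ z ∈ ((PySem.List.enumerate user_id).filter f).map Prod.fst, (0:Int) ≤ z := by
    intro z hz
    obtain ⟨p, hp', rfl⟩ := List.mem_map.1 hz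
    obtain ⟨k, hk, rfl⟩ := (PySem.List.mem_enumerate_iff user_id 0 p).1 (List.mem_of_mem_filter hp')
    simp
  exact toStr_inj_nonneg (hnn x hx) (hnn y hy) hxy

-- every tuple of the product has the length of the candidate list
lemma length_mem_pyProduct : ∀ {cs : List (List String)} {v : List String},
    v ∈ pyProduct cs → v.length = cs.length := by
  intro cs
  induction cs with
  | nil => intro v hv; simp [pyProduct] at hv; simp [hv]
  | cons c rest ih =>
    intro v hv
    simp only [pyProduct, List.mem_flatMap, List.mem_map] at hv
    obtain ⟨x, _, t, ht, rfl⟩ := hv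
    simp [ih ht]

-- PySem.Set.ofList is a sublist of its argument
lemma ofList_sublist {α : Type} [BEq α] [LawfulBEq α] (v : List α) :
    (PySem.Set.ofList v).Sublist v := by
  induction v using List.reverseRecOn with
  | nil => simp [PySem.Set.ofList]
  | append_singleton xs x ih =>
    rw [PySem.Set.ofList_append_singleton, PySem.Set.add_eq_ite]
    split_ifs with hx
    · exact ih.trans (List.sublist_append_left xs [x])
    · exact ih.append_right [x]

-- the `len(set(v)) == len(banned_id)` test is exactly distinctness of the tuple
lemma setlen_eq_iff_nodup (v : List String) :
    (PySem.Set.len (PySem.Set.ofList v) = (v.length : Int)) ↔ v.Nodup := by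
  unfold PySem.Set.len
  constructor
  · intro h
    have hlen : (PySem.Set.ofList v).length = v.length := by exact_mod_cast h
    have := (ofList_sublist v).eq_of_length hlen
    rw [← this]; exact PySem.Set.nodup_ofList v
  · intro h; rw [PySem.Set.ofList_eq_self_of_nodup v h]

-- A's match helper agrees with B's
lemma isMatching_eq_matchesB (u b : String) : isMatching u b = matchesB u b := by
  unfold isMatching matchesB
  by_cases h : PySem.Str.len u = PySem.Str.len b
  · rw [if_neg (by simpa using h)]
    have h' : (PySem.Str.len u == PySem.Str.len b) = true := by
      simpa using h
    rw [h', Bool.true_and]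
  · rw [if_pos (by simpa using h)]
    have h' : (PySem.Str.len u == PySem.Str.len b) = false := by
      simpa using h
    rw [h', Bool.false_and]

def pvKey (v : List String) : String :=
  PySem.Str.join "" (PySem.List.sorted v (fun x => x) false)

-- the DFS is the filtered product fold
lemma dfsB_eq_foldl : ∀ (cands : List (List String)) (used : List String)
    (seen : PySem.Set String), used.Nodup →
    dfsB cands used seen =
      (pyProduct cands).foldl
        (fun sn v => if (used ++ v).Nodup then PySem.Set.add sn (pvKey (used ++ v)) else sn) seen := by
  intro cands
  induction cands with
  | nil =>
    intro used seen hu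
    simp [dfsB, pyProduct, pvKey, hu]
  | cons c rest ih =>
    intro used seen hu
    rw [dfsB, pyProduct, List.foldl_flatMap]
    induction c generalizing seen with
    | nil => simp [dfsLoop]
    | cons s cs ihc =>
      rw [dfsLoop, List.foldl_cons, List.foldl_map, ihc]
      congr 1
      by_cases hs : s ∈ used
      · simp only [List.contains_eq_mem, hs, decide_true, if_true]
        rw [PySem.List.foldl_congr_mem _ _ (fun sn _ => sn) seen ?_, PySem.List.foldl_ignore]
        intro acc t _
        rw [if_neg]
        intro hnd
        rcases List.nodup_append.1 hnd with ⟨_, _, hdisj⟩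
        exact hdisj s hs s (List.mem_cons_self) rfl
      · simp only [List.contains_eq_mem, hs, decide_false]
        rw [ih (used ++ [s]) seen ?_]
        · apply PySem.List.foldl_congr_mem
          intro acc t _
          rw [List.append_cons used s t]
        · rw [List.nodup_append]
          refine ⟨hu, List.nodup_singleton s, fun a ha b hb hab => hs ?_⟩
          simp only [List.mem_singleton] at hb
          exact (hb ▸ hab) ▸ ha

-- ===== VERDICT (by name: the statement is the Claim_ definition above) =====
theorem solution_spec : Claim_equal_solution := by
  intro user_id banned_id _
  unfold Spec_solution
  simp only [solution, solution_alt]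
  rw [PySem.List.foldl_append_singleton_eq_map, List.nil_append]
  have hfa : ∀ b : String,
      PySem.Set.ofList ((PySem.List.enumerate user_id).filterMap
        (fun p => if isMatching p.2 b then some (PySem.Int.toStr p.1) else none))
      = (PySem.List.enumerate user_id).filterMap
        (fun p => if matchesB p.2 b then some (PySem.Int.toStr p.1) else none) := by
    intro b
    rw [PySem.Set.ofList_eq_self_of_nodup _ (cand_nodup user_id (fun p => isMatching p.2 b))]
    congr 1
    funext p
    rw [isMatching_eq_matchesB]
  rw [List.map_congr_left (fun b _ => hfa b)]
  rw [dfsB_eq_foldl _ [] _ List.nodup_nil]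
  congr 1
  apply PySem.List.foldl_congr_mem
  intro acc v hv
  have hlen : v.length = banned_id.length := by
    rw [length_mem_pyProduct hv, List.length_map]
  by_cases hnd : v.Nodup
  · rw [if_pos, if_pos]
    · simp only [List.nil_append, pvKey]
      rfl
    · simpa using hnd
    · rw [← hlen]
      exact (setlen_eq_iff_nodup v).2 hnd
  · rw [if_neg, if_neg]
    · simpa using hnd
    · rw [← hlen]
      exact fun hcontra => hnd ((setlen_eq_iff_nodup v).1 hcontra)
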